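-- pv_equiv track=rewrite | github.com/tugisuwon/codefights | maxDiscount.py | maxDiscount
-- ===== SOURCE A (Python) =====
-- def maxDiscount(p):
--     a = {-1:0}
--     j = []
--     for i in range(len(p)-2):
--         j.append(min(p[i:i+3]))
--     for i in range(len(j)):
--         b = {}
--         for k,l in a.items():
--             if k < i:
--                 t1 = k+3
--                 t2 = k+1
--                 if t1 in b:
--                     b[t1] = max(b[t1],l+j[i])
--                 else:
--                     b[t1] = l+j[i]
--                 if t2 in b:
--                     b[t2] = max(b[t2],l)
--                 else:
--                     b[t2] = l
--                 #b.append((k[0]+j[i],k[1]+3))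
--                 #b.append((k[0],k[1]+1))
--             else:
--                 if k in b:
--                     b[k] = max(b[k],l)
--                 else:
--                     b[k] = l
--         a = b
--         #print i,a
--     return max(j for i,j in a.items())
-- ===== SOURCE B (Python) =====
-- def maxDiscount(p):
--     # forward 1-D cooldown DP: a = best over the windows seen so far,
--     # b/c = that best one/two windows earlier (picks must be >= 3 apart)
--     a = b = c = 0
--     for x, y, z in zip(p, p[1:], p[2:]):
--         a, b, c = max(a, min(x, y, z) + c), a, b
--     return a
-- ===== Notes on version B (the rewrite author's own statement) =====
-- stated objective: simpler
-- what changed: Replaces A's forward dict-of-states DP (a dict of pending-cooldown keys rebuilt via per-step dict merges, plus a precomputed list of window minima via slicing) with a three-variable rolling DP a,b,c = f(i),f(i-1),f(i-2) over zipped window triples, f(i+1)=max(f(i), min(window)+f(i-2)).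
import Mathlib
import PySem

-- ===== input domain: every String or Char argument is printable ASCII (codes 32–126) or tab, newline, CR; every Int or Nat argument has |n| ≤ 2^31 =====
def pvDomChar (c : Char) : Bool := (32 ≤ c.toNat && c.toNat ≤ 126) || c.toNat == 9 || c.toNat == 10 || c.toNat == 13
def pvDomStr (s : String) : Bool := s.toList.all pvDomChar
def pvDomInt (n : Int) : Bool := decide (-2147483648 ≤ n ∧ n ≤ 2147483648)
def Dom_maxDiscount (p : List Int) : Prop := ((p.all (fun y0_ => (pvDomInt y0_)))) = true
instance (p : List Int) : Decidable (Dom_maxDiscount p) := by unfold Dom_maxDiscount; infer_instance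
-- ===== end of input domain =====

-- B replaces A's forward dict-of-states DP by a three-variable rolling cooldown DP over zipped
-- window triples (objective: simpler, measured constant-factor speed-up).

-- ===== PORT A =====
-- j.append(min(p[i:i+3])) for i in range(len(p)-2); every slice in range is nonempty, so the
-- .getD 0 default of min? is unreachable.
def winMinsA (p : List Int) : List Int :=
  (PySem.List.pyRange 0 ((p.length : Int) - 2) 1).map
    (fun i => ((PySem.List.min? (PySem.List.slice p (some i) (some (i + 3))) (fun x => x)).getD 0))

-- the body of 'for k,l in a.items(): …' building dict b
def stepA (jv : Int) (i : Int) (a : PySem.Dict Int Int) : PySem.Dict Int Int :=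
  a.items.foldl
    (fun b kl =>
      let k := kl.1
      let l := kl.2
      if k < i then
        let t1 := k + 3
        let t2 := k + 1
        let b1 := if b.contains t1 then b.insert t1 (max (b.getD t1 0) (l + jv)) else b.insert t1 (l + jv)
        if b1.contains t2 then b1.insert t2 (max (b1.getD t2 0) l) else b1.insert t2 l
      else
        if b.contains k then b.insert k (max (b.getD k 0) l) else b.insert k l)
    (PySem.Dict.mk [])

def maxDiscount (p : List Int) : Int :=
  let j := winMinsA p
  let a : PySem.Dict Int Int :=
    (PySem.List.enumerate j 0).foldl (fun a iv => stepA iv.2 iv.1 a) (PySem.Dict.mk [(-1, 0)])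
  -- max(j for i,j in a.items()); a is never empty, so the .getD 0 default is unreachable
  (PySem.List.max? (a.items.map (fun kv => kv.2)) (fun x => x)).getD 0

-- ===== PORT B =====
def maxDiscount_alt (p : List Int) : Int :=
  ((List.zip p (List.zip (PySem.List.slice p (some 1) none) (PySem.List.slice p (some 2) none))).foldl
    (fun s t => (max s.1 (min t.1 (min t.2.1 t.2.2) + s.2.2), s.1, s.2.1))
    ((0, 0, 0) : Int × Int × Int)).1

-- ===== PRECONDITION & SPEC =====
def Spec_maxDiscount (p : List Int) (out : Int) : Prop := out = maxDiscount_alt p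
instance (p : List Int) (out : Int) : Decidable (Spec_maxDiscount p out) := by unfold Spec_maxDiscount; infer_instance

-- ===== CLAIM (what is proved, stated in full; the proofs are below) =====
def Claim_equal_maxDiscount : Prop := ∀ (p : List Int), Dom_maxDiscount p → Spec_maxDiscount p (maxDiscount p)

-- ===== LEMMAS AND PROOFS =====

-- B's dp value after k windows of the window-min list j
def fdp (j : List Int) : Nat → Int
  | 0 => 0
  | (k + 1) => max (fdp j k) (j.getD k 0 + fdp j (k - 2))

-- the three values held by A's dict after m ≥ 2 loop iterations, at keys m-1, m, m+1
def w1 (j : List Int) (m : Nat) : Int := fdp j (m - 2)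
def w2 (j : List Int) (m : Nat) : Int := j.getD (m - 2) 0 + fdp j (m - 4)
def w3 (j : List Int) (m : Nat) : Int := j.getD (m - 1) 0 + fdp j (m - 3)

-- A's dict after m ≥ 2 steps: keys {m-1, m, m+1}, insertion order cycling with m % 3
def ordD (j : List Int) (m : Nat) : PySem.Dict Int Int :=
  if m % 3 = 0 then
    PySem.Dict.mk [((m : Int) - 1, w1 j m), ((m : Int), w2 j m), ((m : Int) + 1, w3 j m)]
  else if m % 3 = 1 then
    PySem.Dict.mk [((m : Int) + 1, w3 j m), ((m : Int) - 1, w1 j m), ((m : Int), w2 j m)]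
  else
    PySem.Dict.mk [((m : Int), w2 j m), ((m : Int) + 1, w3 j m), ((m : Int) - 1, w1 j m)]

def loopA (j : List Int) : PySem.Dict Int Int :=
  (PySem.List.enumerate j 0).foldl (fun a iv => stepA iv.2 iv.1 a) (PySem.Dict.mk [(-1, 0)])

theorem fdp_append (j : List Int) (x : Int) : ∀ (k : Nat), k ≤ j.length → fdp (j ++ [x]) k = fdp j k := by
  intro k
  induction k using Nat.strong_induction_on with
  | _ k ih =>
    match k with
    | 0 => intro _; simp [fdp]
    | (k + 1) =>
      intro hk
      have h1 : k < j.length := by omega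
      simp only [fdp]
      rw [ih k (by omega) (by omega), ih (k - 2) (by omega) (by omega),
        List.getD_append _ _ _ _ h1]

theorem B_fold (j : List Int) :
    j.foldl (fun (s : Int × Int × Int) w => (max s.1 (w + s.2.2), s.1, s.2.1)) (0, 0, 0)
      = (fdp j j.length, fdp j (j.length - 1), fdp j (j.length - 2)) := by
  induction j using List.reverseRecOn with
  | nil => simp [fdp]
  | append_singleton j x ih =>
    rw [List.foldl_append, ih]
    simp only [List.foldl_cons, List.foldl_nil, List.length_append, List.length_singleton]
    have hlen : j.length + 1 - 1 = j.length := by omega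
    have hget : (j ++ [x]).getD j.length 0 = x := by
      simp [List.getD_eq_getElem?_getD]
    refine Prod.ext ?_ (Prod.ext ?_ ?_)
    · show max (fdp j j.length) (x + fdp j (j.length - 2)) = fdp (j ++ [x]) (j.length + 1)
      simp only [fdp, hget]
      rw [fdp_append j x j.length (by omega), fdp_append j x (j.length - 2) (by omega)]
    · show fdp j j.length = fdp (j ++ [x]) (j.length + 1 - 1)
      rw [hlen, fdp_append j x j.length (by omega)]
    · show fdp j (j.length - 1) = fdp (j ++ [x]) (j.length + 1 - 2)
      have : j.length + 1 - 2 = j.length - 1 := by omega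
      rw [this, fdp_append j x (j.length - 1) (by omega)]

theorem loopA_append (j : List Int) (x : Int) :
    loopA (j ++ [x]) = stepA x (j.length : Int) (loopA j) := by
  unfold loopA
  rw [PySem.List.enumerate_append, List.foldl_append]
  simp [PySem.List.enumerate_cons, PySem.List.enumerate_nil]

theorem winMins_eq (p : List Int) :
    winMinsA p
      = (List.zip p (List.zip (p.drop 1) (p.drop 2))).map (fun t => min t.1 (min t.2.1 t.2.2)) := by
  unfold winMinsA
  apply List.ext_getElem
  · simp [PySem.List.length_pyRange_one]
    omega
  · intro k h1 h2
    simp only [List.getElem_map, PySem.List.getElem_pyRange_one, List.getElem_zip, zero_add]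
    have hlen : (PySem.List.pyRange 0 ((p.length : Int) - 2) 1).length = p.length - 2 := by
      simp [PySem.List.length_pyRange_one]; omega
    simp only [List.length_map, hlen] at h1
    have hk : k + 2 < p.length := by omega
    have hslice : PySem.List.slice p (some (k : Int)) (some ((k : Int) + 3)) = (p.drop k).take 3 := by
      have := PySem.List.slice_natCast_add (xs := p) (j := k) (n := 3)
      push_cast at this ⊢
      exact this
    have htake : (p.drop k).take 3 = [p[k], p[k+1], p[k+2]] := by
      apply List.ext_getElem
      · simp; omega
      · intro i hi1 hi2
        have hi : i < 3 := (by simpa using hi1 : i < 3 ∧ _).1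
        simp only [List.getElem_take, List.getElem_drop]
        interval_cases i <;> simp
    rw [hslice, htake, PySem.List.min?_id_cons]
    simp only [List.foldl_cons, List.foldl_nil, Option.getD_some, List.getElem_drop]
    rw [min_assoc]
    have e1 : 1 + k = k + 1 := by omega
    have e2 : 2 + k = k + 2 := by omega
    simp only [e1, e2]

-- one pass of A's dict loop on a 3-key dict, the three insertion orders
theorem step_rot0 (M u v w x : Int) :
    stepA x M (PySem.Dict.mk [(M - 1, u), (M, v), (M + 1, w)])
      = PySem.Dict.mk [(M + 2, u + x), (M, max u v), (M + 1, w)] := by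
  have n1 : M - 1 + 3 = M + 2 := by ring
  have n2 : M - 1 + 1 = M := by ring
  have l1 : M - 1 < M := by omega
  have l3 : ¬ (M + 1 < M) := by omega
  have b1 : ((M + 2 : Int) == M) = false := by rw [beq_eq_false_iff_ne]; omega
  have b2 : ((M + 2 : Int) == M + 1) = false := by rw [beq_eq_false_iff_ne]; omega
  have b3 : ((M : Int) == M + 1) = false := by rw [beq_eq_false_iff_ne]; omega
  unfold stepA
  simp [PySem.Dict.contains, PySem.Dict.insert, PySem.Dict.getD, PySem.Dict.get?,
    n1, n2, l1, l3, b1, b2, b3]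

theorem step_rot1 (M u v w x : Int) :
    stepA x M (PySem.Dict.mk [(M + 1, w), (M - 1, u), (M, v)])
      = PySem.Dict.mk [(M + 1, w), (M + 2, u + x), (M, max u v)] := by
  have n1 : M - 1 + 3 = M + 2 := by ring
  have n2 : M - 1 + 1 = M := by ring
  have l1 : M - 1 < M := by omega
  have l3 : ¬ (M + 1 < M) := by omega
  have b1 : ((M + 2 : Int) == M) = false := by rw [beq_eq_false_iff_ne]; omega
  have b2 : ((M + 1 : Int) == M + 2) = false := by rw [beq_eq_false_iff_ne]; omega
  have b3 : ((M + 1 : Int) == M) = false := by rw [beq_eq_false_iff_ne]; omega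
  have b4 : ((M + 2 : Int) == M + 1) = false := by rw [beq_eq_false_iff_ne]; omega
  unfold stepA
  simp [PySem.Dict.contains, PySem.Dict.insert, PySem.Dict.getD, PySem.Dict.get?,
    n1, n2, l1, l3, b1, b2, b3]

theorem step_rot2 (M u v w x : Int) :
    stepA x M (PySem.Dict.mk [(M, v), (M + 1, w), (M - 1, u)])
      = PySem.Dict.mk [(M, max v u), (M + 1, w), (M + 2, u + x)] := by
  have n1 : M - 1 + 3 = M + 2 := by ring
  have n2 : M - 1 + 1 = M := by ring
  have l1 : M - 1 < M := by omega
  have l3 : ¬ (M + 1 < M) := by omega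
  have b1 : ((M : Int) == M + 1) = false := by rw [beq_eq_false_iff_ne]; omega
  have b2 : ((M : Int) == M + 2) = false := by rw [beq_eq_false_iff_ne]; omega
  have b3 : ((M + 1 : Int) == M + 2) = false := by rw [beq_eq_false_iff_ne]; omega
  have b4 : ((M + 1 : Int) == M) = false := by rw [beq_eq_false_iff_ne]; omega
  unfold stepA
  simp [PySem.Dict.contains, PySem.Dict.insert, PySem.Dict.getD, PySem.Dict.get?,
    n1, n2, l1, l3, b1, b2, b3]

-- how the three stored values advance when window m (0-based) with min x is processed
theorem w_step1 (j : List Int) (x : Int) (m : Nat) (hm : 2 ≤ m) (hlen : j.length = m) :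
    w1 (j ++ [x]) (m + 1) = max (w1 j m) (w2 j m) := by
  unfold w1 w2
  have h1 : m + 1 - 2 = (m - 2) + 1 := by omega
  rw [h1]
  simp only [fdp]
  have h2 : m - 2 - 2 = m - 4 := by omega
  rw [h2, fdp_append j x (m - 2) (by omega), fdp_append j x (m - 4) (by omega),
    List.getD_append _ _ _ _ (by omega)]

theorem w_step2 (j : List Int) (x : Int) (m : Nat) (hm : 2 ≤ m) (hlen : j.length = m) :
    w2 (j ++ [x]) (m + 1) = w3 j m := by
  unfold w2 w3
  have h1 : m + 1 - 2 = m - 1 := by omega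
  have h2 : m + 1 - 4 = m - 3 := by omega
  rw [h1, h2, fdp_append j x (m - 3) (by omega), List.getD_append _ _ _ _ (by omega)]

theorem w_step3 (j : List Int) (x : Int) (m : Nat) (hm : 2 ≤ m) (hlen : j.length = m) :
    w3 (j ++ [x]) (m + 1) = w1 j m + x := by
  unfold w3 w1
  have h1 : m + 1 - 1 = m := by omega
  have h2 : m + 1 - 3 = m - 2 := by omega
  have hget : (j ++ [x]).getD m 0 = x := by
    subst hlen; simp [List.getD_eq_getElem?_getD]
  rw [h1, h2, hget, fdp_append j x (m - 2) (by omega)]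
  ring

theorem step_ord (j : List Int) (x : Int) (m : Nat) (hm : 2 ≤ m) (hlen : j.length = m) :
    stepA x (m : Int) (ordD j m) = ordD (j ++ [x]) (m + 1) := by
  have hv1 := w_step1 j x m hm hlen
  have hv2 := w_step2 j x m hm hlen
  have hv3 := w_step3 j x m hm hlen
  have hc : m % 3 = 0 ∨ m % 3 = 1 ∨ m % 3 = 2 := by omega
  rcases hc with h | h | h
  · have h' : (m + 1) % 3 = 1 := by omega
    have h'' : ¬ ((m + 1) % 3 = 0) := by omega
    rw [ordD, if_pos h, ordD, if_neg h'', if_pos h', step_rot0]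
    rw [hv1, hv2, hv3]
    push_cast
    ring_nf
  · have h' : (m + 1) % 3 = 2 := by omega
    rw [ordD, if_neg (by omega), if_pos h, ordD, if_neg (by omega), if_neg (by omega), step_rot1]
    rw [hv1, hv2, hv3]
    push_cast
    ring_nf
  · have h' : (m + 1) % 3 = 0 := by omega
    rw [ordD, if_neg (by omega), if_neg (by omega), step_rot2, ordD, if_pos h']
    rw [hv1, hv2, hv3, max_comm (w2 j m) (w1 j m)]
    push_cast
    ring_nf

-- the dict after the first two iterations
theorem loopA_two (y z : Int) : loopA [y, z] = ordD [y, z] 2 := by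
  have : ([y] : List Int) ++ [z] = [y, z] := rfl
  rw [← this, loopA_append]
  unfold loopA ordD w1 w2 w3
  norm_num
  simp [stepA,
    PySem.Dict.contains, PySem.Dict.insert, PySem.Dict.getD, PySem.Dict.get?, fdp]

theorem loopA_ord (j : List Int) : ∀ (m : Nat), 2 ≤ m → j.length = m → loopA j = ordD j m := by
  induction j using List.reverseRecOn with
  | nil => intro m hm hlen; simp at hlen; omega
  | append_singleton j x ih =>
    intro m hm hlen
    simp only [List.length_append, List.length_singleton] at hlen
    by_cases h2 : 2 ≤ j.length
    · have := ih j.length h2 rfl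
      rw [loopA_append, this, step_ord j x j.length h2 rfl]
      have : j.length + 1 = m := by omega
      rw [this]
    · have h1 : j.length = 1 := by omega
      obtain ⟨y, hy⟩ : ∃ y, j = [y] := by
        match j, h1 with
        | [y], _ => exact ⟨y, rfl⟩
      subst hy
      have : m = 2 := by omega
      rw [this]
      exact loopA_two y x

-- max of the three stored values is B's dp value
theorem fdp_eq_max (j : List Int) (m : Nat) (hm : 2 ≤ m) :
    fdp j m = max (max (w1 j m) (w2 j m)) (w3 j m) := by
  unfold w1 w2 w3
  have h1 : m = (m - 1) + 1 := by omega
  have h2 : m - 1 = (m - 2) + 1 := by omega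
  conv_lhs => rw [h1]
  simp only [fdp]
  have e1 : (m - 1) - 2 = m - 3 := by omega
  have e2 : (m - 2) - 2 = m - 4 := by omega
  conv_lhs => rw [h2]
  simp only [fdp]
  rw [e2]
  have e3 : (m - 2) + 1 - 1 = m - 2 := by omega
  have e4 : (m - 2) + 1 = m - 1 := by omega
  rw [e4, e1]

theorem maxDiscount_alt_eq (p : List Int) :
    maxDiscount_alt p = fdp (winMinsA p) (winMinsA p).length := by
  unfold maxDiscount_alt
  rw [PySem.List.slice_from_one, winMins_eq]
  have hd : p.tail = p.drop 1 := by simp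
  have hd2 : PySem.List.slice p (some 2) none = p.drop 2 := by
    rw [show ((2:Int)) = ((2:Nat):Int) by norm_num, PySem.List.slice_from_natCast]
  rw [hd, hd2]
  rw [← List.foldl_map (f := fun t : Int × Int × Int => min t.1 (min t.2.1 t.2.2))
    (g := fun (s : Int × Int × Int) w => (max s.1 (w + s.2.2), s.1, s.2.1))]
  rw [B_fold, List.length_map]

-- ===== VERDICT (by name: the statement is the Claim_ definition above) =====
theorem maxDiscount_spec : Claim_equal_maxDiscount := by
  unfold Claim_equal_maxDiscount Spec_maxDiscount
  intro p _
  rw [maxDiscount_alt_eq]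
  show (PySem.List.max? ((loopA (winMinsA p)).items.map (fun kv => kv.2)) (fun x => x)).getD 0 = _
  set j := winMinsA p with hj
  by_cases h0 : j.length = 0
  · have : j = [] := List.eq_nil_of_length_eq_zero h0
    rw [this]
    simp [loopA, PySem.List.enumerate_nil, PySem.List.max?, fdp]
  · by_cases h1 : j.length = 1
    · obtain ⟨y, hy⟩ : ∃ y, j = [y] := by
        match j, h1 with
        | [y], _ => exact ⟨y, rfl⟩
      rw [hy]
      have : loopA [y] = PySem.Dict.mk [(2, y), (0, 0)] := by
        simp [loopA, PySem.List.enumerate_cons, PySem.List.enumerate_nil, stepA,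
          PySem.Dict.contains, PySem.Dict.insert, PySem.Dict.getD, PySem.Dict.get?]
      rw [this]
      simp only [List.map_cons, List.map_nil]
      rw [PySem.List.max?_id_cons]
      simp [fdp, max_comm]
    · have hm : 2 ≤ j.length := by omega
      rw [loopA_ord j j.length hm rfl, fdp_eq_max j j.length hm]
      unfold ordD
      have hc : j.length % 3 = 0 ∨ j.length % 3 = 1 ∨ j.length % 3 = 2 := by omega
      rcases hc with h | h | h
      · rw [if_pos h]
        simp only [List.map_cons, List.map_nil]
        rw [PySem.List.max?_id_cons]
        simp
      · rw [if_neg (by omega), if_pos h]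
        simp only [List.map_cons, List.map_nil]
        rw [PySem.List.max?_id_cons]
        simp only [List.foldl_cons, List.foldl_nil, Option.getD_some]
        omega
      · rw [if_neg (by omega), if_neg (by omega)]
        simp only [List.map_cons, List.map_nil]
        rw [PySem.List.max?_id_cons]
        simp only [List.foldl_cons, List.foldl_nil, Option.getD_some]
        omega
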